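-- pv_equiv track=rewrite | github.com/fairdataihub/dmpchef | utils/nih_docx_writer.py | _split_into_heading_blocks
-- ===== SOURCE A (Python) =====
-- from typing import Dict, List, Tuple, Optional, Any
--
-- def _split_into_heading_blocks(text: str) -> List[Tuple[str, str]]:
--     lines = text.split("\n")
--     blocks: List[Tuple[str, List[str]]] = []
--
--     def is_heading(line: str) -> bool:
--         s = line.strip()
--         if not s:
--             return False
--         if s.lower().startswith("element "):
--             return True
--         if s.startswith("### "):
--             return True
--         return False
--
--     current_heading: Optional[str] = None
--     current_content: List[str] = []
--
--     for line in lines: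
--         if is_heading(line):
--             if current_heading is not None:
--                 blocks.append((current_heading, current_content))
--             current_heading = line.strip().lstrip("#").strip()
--             current_content = []
--         else:
--             current_content.append(line)
--
--     if current_heading is not None:
--         blocks.append((current_heading, current_content))
--
--     out: List[Tuple[str, str]] = []
--     for h, content_lines in blocks:
--         content = "\n".join(content_lines).strip()
--         out.append((h, content))
--     return out
-- ===== SOURCE B (Python) =====
-- def _split_into_heading_blocks(text):
--     lines = text.split("\n")
--
--     def is_heading(line):
--         s = line.strip()
--         if not s:
--             return False
--         if s.lower().startswith("element "):
--             return True
--         if s.startswith("### "):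
--             return True
--         return False
--
--     def span_non_heading(ls):
--         """Split ls into (longest non-heading prefix, remainder)."""
--         for j, l in enumerate(ls):
--             if is_heading(l):
--                 return ls[:j], ls[j:]
--         return ls, []
--
--     out = []
--     _, rest = span_non_heading(lines)  # lines before the first heading are dropped
--     while rest:
--         head, rest = rest[0], rest[1:]
--         content, rest = span_non_heading(rest)
--         out.append((head.strip().lstrip("#").strip(), "\n".join(content).strip()))
--     return out
-- ===== Notes on version B (the rewrite author's own statement) =====
-- stated objective: alternative
-- what changed: Replaces A's streaming fold with pending-heading state, trailing flush and a second join/strip pass by a span-based scanner: drop the pre-heading prefix, then repeatedly take the heading and its longest non-heading span, emitting each finished block immediately.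
import Mathlib
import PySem

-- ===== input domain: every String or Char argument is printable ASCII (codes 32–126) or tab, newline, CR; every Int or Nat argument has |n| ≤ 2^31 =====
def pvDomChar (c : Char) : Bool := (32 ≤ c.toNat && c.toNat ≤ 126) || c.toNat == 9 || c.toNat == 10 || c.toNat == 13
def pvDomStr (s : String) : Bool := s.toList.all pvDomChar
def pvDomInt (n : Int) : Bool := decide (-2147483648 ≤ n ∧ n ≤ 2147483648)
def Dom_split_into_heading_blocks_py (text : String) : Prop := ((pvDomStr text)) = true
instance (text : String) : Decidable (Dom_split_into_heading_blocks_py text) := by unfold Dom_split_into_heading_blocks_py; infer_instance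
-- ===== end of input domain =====

-- B replaces A's streaming flush (pending heading + trailing flush + second join pass) by a
-- span-based scanner that drops the pre-heading prefix and emits each finished block at once
-- (objective: alternative decomposition, same cost).

-- ===== PORT A =====
-- shared helper: Python's local is_heading, step for step
def pvIsHeading (line : List Char) : Bool :=
  let s := PySem.Chars.strip line
  if s.isEmpty then false
  else if PySem.Chars.startswith (PySem.Chars.lower s) "element ".toList then true
  else if PySem.Chars.startswith s "### ".toList then true
  else false

-- shared helper: line.strip().lstrip("#").strip(); lstrip("#") = drop leading '#' chars (exact by hand)
def pvNorm (line : List Char) : List Char :=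
  PySem.Chars.strip ((PySem.Chars.strip line).dropWhile (· == '#'))

-- A's loop body: state = (current_heading, current_content, blocks)
def pvStep (st : Option (List Char) × List (List Char) × List (List Char × List (List Char)))
    (line : List Char) :
    Option (List Char) × List (List Char) × List (List Char × List (List Char)) :=
  let (curH, curC, blocks) := st
  if pvIsHeading line then
    (some (pvNorm line), [],
      match curH with
      | some h => blocks ++ [(h, curC)]
      | none => blocks)
  else (curH, curC ++ [line], blocks)

-- A's trailing flush after the loop
def pvFinish (st : Option (List Char) × List (List Char) × List (List Char × List (List Char))) :
    List (List Char × List (List Char)) :=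
  match st with
  | (some h, c, b) => b ++ [(h, c)]
  | (none, _, b) => b

-- A's second pass: content = "\n".join(content_lines).strip()
def pvOut (p : List Char × List (List Char)) : String × String :=
  (String.ofList p.1, String.ofList (PySem.Chars.strip (PySem.Chars.join "\n".toList p.2)))

def split_into_heading_blocks_py (text : String) : List (String × String) :=
  let lines := PySem.Chars.splitOn text.toList "\n".toList
  (pvFinish (lines.foldl pvStep (none, [], []))).map pvOut

-- ===== PORT B =====
-- Source B's while loop: first line is a heading (or list empty); span_non_heading = takeWhile/dropWhile
def pvAltBlocks : List (List Char) → List (String × String)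
  | [] => []
  | h :: rest =>
    (String.ofList (pvNorm h),
     String.ofList (PySem.Chars.strip (PySem.Chars.join "\n".toList
       (rest.takeWhile (fun l => !pvIsHeading l)))))
    :: pvAltBlocks (rest.dropWhile (fun l => !pvIsHeading l))
termination_by ls => ls.length
decreasing_by
  have := List.length_dropWhile_le (fun l => !pvIsHeading l) rest
  simp only [List.length_cons]
  omega

def split_into_heading_blocks_py_alt (text : String) : List (String × String) :=
  let lines := PySem.Chars.splitOn text.toList "\n".toList
  pvAltBlocks (lines.dropWhile (fun l => !pvIsHeading l))

-- ===== PRECONDITION & SPEC =====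
def Spec_split_into_heading_blocks_py (text : String) (out : List (String × String)) : Prop := out = split_into_heading_blocks_py_alt text
instance (text : String) (out : List (String × String)) : Decidable (Spec_split_into_heading_blocks_py text out) := by unfold Spec_split_into_heading_blocks_py; infer_instance

-- ===== CLAIM (what is proved, stated in full; the proofs are below) =====
def Claim_equal_split_into_heading_blocks_py : Prop := ∀ (text : String), Dom_split_into_heading_blocks_py text → Spec_split_into_heading_blocks_py text (split_into_heading_blocks_py text)

-- ===== LEMMAS AND PROOFS =====

-- After a heading has been seen: the fold from state (some h, c, b) produces b, then the block
-- (h, c ++ longest non-heading prefix), then B's blocks of the remainder.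
theorem pv_main (ls : List (List Char)) :
    ∀ (h : List Char) (c : List (List Char)) (b : List (List Char × List (List Char))),
    (pvFinish (ls.foldl pvStep (some h, c, b))).map pvOut
      = b.map pvOut
        ++ pvOut (h, c ++ ls.takeWhile (fun l => !pvIsHeading l))
        :: pvAltBlocks (ls.dropWhile (fun l => !pvIsHeading l)) := by
  induction ls with
  | nil => intro h c b; simp [pvFinish, pvAltBlocks]
  | cons l ls ih =>
    intro h c b
    by_cases hl : pvIsHeading l = true
    · simp only [List.foldl_cons, pvStep, hl, reduceIte]
      rw [ih]
      simp [hl, pvAltBlocks, pvOut, List.map_append]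
    · simp only [List.foldl_cons, pvStep, hl, Bool.false_eq_true, reduceIte]
      rw [ih]
      simp [hl, List.append_assoc]

-- Before any heading: the fold from state (none, c, b) produces b, then B's blocks of the
-- suffix starting at the first heading.
theorem pv_skip (ls : List (List Char)) :
    ∀ (c : List (List Char)) (b : List (List Char × List (List Char))),
    (pvFinish (ls.foldl pvStep (none, c, b))).map pvOut
      = b.map pvOut ++ pvAltBlocks (ls.dropWhile (fun l => !pvIsHeading l)) := by
  induction ls with
  | nil => intro c b; simp [pvFinish, pvAltBlocks]
  | cons l ls ih =>
    intro c b
    by_cases hl : pvIsHeading l = true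
    · simp only [List.foldl_cons, pvStep, hl, reduceIte]
      rw [pv_main]
      simp [hl, pvAltBlocks, pvOut]
    · simp only [List.foldl_cons, pvStep, hl, Bool.false_eq_true, reduceIte]
      rw [ih]
      simp [hl]

-- ===== VERDICT (by name: the statement is the Claim_ definition above) =====
theorem split_into_heading_blocks_py_spec : Claim_equal_split_into_heading_blocks_py := by
  intro text _
  unfold Spec_split_into_heading_blocks_py split_into_heading_blocks_py split_into_heading_blocks_py_alt
  simpa using pv_skip (PySem.Chars.splitOn text.toList "\n".toList) [] []
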